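-- pv_equiv track=rewrite | github.com/VivianaEscobarB/TLF_proyecto-master | analizadores/comentario_bloque.py | analizar
-- ===== SOURCE A (Python) =====
-- def analizar(texto, pos_inicial):
--     """
--     Analiza si a partir de la posición inicial hay un comentario de bloque.
--     Un comentario de bloque comienza con /* y termina con */.
--
--     Args:
--         texto: Cadena de texto a analizar
--         pos_inicial: Posición desde donde comenzar el análisis
--
--     Returns:
--         Tupla de (es_valido, lexema, caracteres_consumidos)
--     """
--     # Estados del autómata:
--     # 0: Inicial
--     # 1: Después de /
--     # 2: Dentro del comentario (después de /*)
--     # 3: Posible fin (después de * dentro del comentario)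
--     # 4: Fin de comentario (después de */)
--
--     estado = 0
--     lexema = ''
--     pos = pos_inicial
--
--     while pos < len(texto):
--         c = texto[pos]
--
--         if estado == 0:  # Estado inicial
--             if c == '/':
--                 estado = 1
--                 lexema += c
--                 pos += 1
--             else:
--                 break
--
--         elif estado == 1:  # Después de /
--             if c == '*':
--                 estado = 2
--                 lexema += c
--                 pos += 1
--             else:
--                 break  # No es un comentario de bloque
--
--         elif estado == 2:  # Dentro del comentario
--             if c == '*':
--                 estado = 3
--                 lexema += c
--                 pos += 1
--             else:
--                 lexema += c
--                 pos += 1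
--
--         elif estado == 3:  # Posible fin
--             if c == '/':
--                 estado = 4
--                 lexema += c
--                 pos += 1
--                 break  # Fin del comentario
--             elif c == '*':
--                 lexema += c
--                 pos += 1
--                 # Seguimos en estado 3
--             else:
--                 estado = 2  # Volver a estar dentro del comentario
--                 lexema += c
--                 pos += 1
--
--     # Verificar si terminamos con un comentario válido
--     if estado == 4:
--         return True, lexema, len(lexema)
--     else:
--         return False, '', 0
-- ===== SOURCE B (Python) =====
-- def analizar(texto, pos_inicial):
--     if texto[pos_inicial:pos_inicial + 2] != '/*':
--         return False, '', 0
--     idx = texto.find('*/', pos_inicial + 2)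
--     if idx == -1:
--         return False, '', 0
--     lexema = texto[pos_inicial:idx + 2]
--     return True, lexema, len(lexema)
-- ===== Notes on version B (the rewrite author's own statement) =====
-- stated objective: simpler
-- what changed: Replaces the 5-state character automaton with a '/*' prefix check followed by a single str.find for the first '*/' and one slice.
-- outside the precondition, e.g. on analizar('*/ab/*', -2): A returns (True, '/**/', 4), B returns (False, '', 0); on analizar('', -1): A raises IndexError, B returns (False, '', 0)
import Mathlib
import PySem

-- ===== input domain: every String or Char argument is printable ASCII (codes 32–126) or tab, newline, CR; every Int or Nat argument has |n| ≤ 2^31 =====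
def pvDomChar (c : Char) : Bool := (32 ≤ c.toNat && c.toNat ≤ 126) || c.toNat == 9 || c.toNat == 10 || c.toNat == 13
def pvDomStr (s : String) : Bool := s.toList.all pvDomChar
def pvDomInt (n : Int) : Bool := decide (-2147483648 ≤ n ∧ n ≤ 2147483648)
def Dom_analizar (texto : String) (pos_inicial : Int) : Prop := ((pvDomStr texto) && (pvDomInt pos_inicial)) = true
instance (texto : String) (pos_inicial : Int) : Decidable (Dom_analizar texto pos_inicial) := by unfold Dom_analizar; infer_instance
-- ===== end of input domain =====

-- B replaces A's 5-state character automaton by a '/*' prefix check plus a single find('*/') and one slice (same cost; simpler).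

-- ===== PORT A =====
-- literal transliteration of A's while-loop automaton; the `none` case of pyGet? is Python's
-- IndexError (pos_inicial < -len(texto)), excluded by Pre_analizar.
def analizarLoop (cs : List Char) (estado : Nat) (lexema : List Char) (pos : Int) : Nat × List Char :=
  if h : pos < (cs.length : Int) then
    match PySem.List.pyGet? cs pos with
    | none => (estado, lexema)
    | some c =>
      if estado = 0 then
        if c = '/' then analizarLoop cs 1 (lexema ++ [c]) (pos + 1) else (estado, lexema)
      else if estado = 1 then
        if c = '*' then analizarLoop cs 2 (lexema ++ [c]) (pos + 1) else (estado, lexema)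
      else if estado = 2 then
        if c = '*' then analizarLoop cs 3 (lexema ++ [c]) (pos + 1)
        else analizarLoop cs 2 (lexema ++ [c]) (pos + 1)
      else if estado = 3 then
        if c = '/' then (4, lexema ++ [c])
        else if c = '*' then analizarLoop cs 3 (lexema ++ [c]) (pos + 1)
        else analizarLoop cs 2 (lexema ++ [c]) (pos + 1)
      else (estado, lexema)
  else (estado, lexema)
termination_by ((cs.length : Int) - pos).toNat
decreasing_by all_goals omega

def analizar (texto : String) (pos_inicial : Int) : Bool × String × Int :=
  let r := analizarLoop texto.toList 0 [] pos_inicial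
  if r.1 = 4 then (true, String.mk r.2, (r.2.length : Int)) else (false, "", 0)

-- ===== PORT B =====
def analizar_alt (texto : String) (pos_inicial : Int) : Bool × String × Int :=
  let cs := texto.toList
  if PySem.List.slice cs (some pos_inicial) (some (pos_inicial + 2)) ≠ ['/', '*'] then
    (false, "", 0)
  else
    let idx := PySem.Chars.findFrom cs ['*', '/'] (pos_inicial + 2) none
    if idx = -1 then (false, "", 0)
    else
      let lexema := PySem.List.slice cs (some pos_inicial) (some (idx + 2))
      (true, String.mk lexema, (lexema.length : Int))

-- ===== PRECONDITION & SPEC =====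
-- Pre_ excludes negative starting positions: there A raises IndexError (pos_inicial < -len(texto))
-- or its per-character negative indexing wraps around and re-reads the string, an accidental value
-- neither implementation specifies (B follows Python's clamped slice/find semantics instead).
def Pre_analizar (texto : String) (pos_inicial : Int) : Prop := 0 ≤ pos_inicial
instance (texto : String) (pos_inicial : Int) : Decidable (Pre_analizar texto pos_inicial) := by unfold Pre_analizar; infer_instance
def pvWitness_analizar : String × Int := ("/*a*/", 0)

def Spec_analizar (texto : String) (pos_inicial : Int) (out : Bool × String × Int) : Prop := out = analizar_alt texto pos_inicial
instance (texto : String) (pos_inicial : Int) (out : Bool × String × Int) : Decidable (Spec_analizar texto pos_inicial out) := by unfold Spec_analizar; infer_instance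

-- ===== CLAIM (what is proved, stated in full; the proofs are below) =====
def Claim_equal_analizar : Prop := ∀ (texto : String) (pos_inicial : Int), Dom_analizar texto pos_inicial → Pre_analizar texto pos_inicial → Spec_analizar texto pos_inicial (analizar texto pos_inicial)

-- ===== LEMMAS AND PROOFS =====

-- proof-only helpers: pvRun2/pvRun3 describe what A's automaton consumes in states 2/3 on the
-- remaining suffix; pvFS is the index of the first "*/" in a list.
mutual
def pvRun2 : List Char → Option (List Char)
  | [] => none
  | c :: rest => if c = '*' then (pvRun3 rest).map (c :: ·) else (pvRun2 rest).map (c :: ·)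
def pvRun3 : List Char → Option (List Char)
  | [] => none
  | c :: rest =>
    if c = '/' then some [c]
    else if c = '*' then (pvRun3 rest).map (c :: ·)
    else (pvRun2 rest).map (c :: ·)
end

def pvFS : List Char → Option Nat
  | c1 :: c2 :: rest => if c1 = '*' ∧ c2 = '/' then some 0 else (pvFS (c2 :: rest)).map (· + 1)
  | _ => none

theorem pvLoop_stop (cs : List Char) (e : Nat) (lex : List Char) (pos : Int)
    (h : (cs.length : Int) ≤ pos) : analizarLoop cs e lex pos = (e, lex) := by
  rw [analizarLoop]
  simp [show ¬ (pos < (cs.length : Int)) by omega]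

theorem pvRun_loop (n : Nat) : ∀ (cs : List Char) (q : Nat), cs.length - q ≤ n → ∀ lex : List Char,
    ((∀ t, pvRun2 (cs.drop q) = some t → analizarLoop cs 2 lex (q : Int) = (4, lex ++ t)) ∧
     (pvRun2 (cs.drop q) = none → (analizarLoop cs 2 lex (q : Int)).1 ≠ 4) ∧
     (∀ t, pvRun3 (cs.drop q) = some t → analizarLoop cs 3 lex (q : Int) = (4, lex ++ t)) ∧
     (pvRun3 (cs.drop q) = none → (analizarLoop cs 3 lex (q : Int)).1 ≠ 4)) := by
  induction n with
  | zero =>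
    intro cs q hq lex
    have hstop : ∀ e, analizarLoop cs e lex (q : Int) = (e, lex) :=
      fun e => pvLoop_stop cs e lex q (by exact_mod_cast Nat.le_of_sub_eq_zero (by omega))
    have hdrop : cs.drop q = [] := List.drop_eq_nil_of_le (by omega)
    rw [hdrop]
    exact ⟨by simp [pvRun2], by simp [hstop], by simp [pvRun3], by simp [hstop]⟩
  | succ n ihn =>
    intro cs q hq lex
    by_cases hlt : q < cs.length
    · have hdrop : cs.drop q = cs[q] :: cs.drop (q + 1) := List.drop_eq_getElem_cons hlt
      have hget : PySem.List.pyGet? cs (q : Int) = some cs[q] := by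
        rw [PySem.List.pyGet?_natCast, List.getElem?_eq_getElem hlt]
      have hcast : ((q : Int) + 1) = ((q + 1 : Nat) : Int) := by push_cast; ring
      have hlen : (q : Int) < (cs.length : Int) := by exact_mod_cast hlt
      have hstep2 : analizarLoop cs 2 lex (q : Int) =
          (if cs[q] = '*' then analizarLoop cs 3 (lex ++ [cs[q]]) ((q : Int) + 1)
           else analizarLoop cs 2 (lex ++ [cs[q]]) ((q : Int) + 1)) := by
        rw [analizarLoop]
        rw [dif_pos hlen, hget]
        norm_num
      have hstep3 : analizarLoop cs 3 lex (q : Int) =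
          (if cs[q] = '/' then (4, lex ++ [cs[q]])
           else if cs[q] = '*' then analizarLoop cs 3 (lex ++ [cs[q]]) ((q : Int) + 1)
           else analizarLoop cs 2 (lex ++ [cs[q]]) ((q : Int) + 1)) := by
        rw [analizarLoop]
        rw [dif_pos hlen, hget]
        norm_num
      have IH2some : ∀ (lex' t' : List Char), pvRun2 (cs.drop (q + 1)) = some t' →
          analizarLoop cs 2 lex' ((q : Int) + 1) = (4, lex' ++ t') := by
        intro lex' t' h'
        rw [hcast]
        exact (ihn cs (q + 1) (by omega) lex').1 t' h'
      have IH2none : pvRun2 (cs.drop (q + 1)) = none →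
          ∀ lex' : List Char, (analizarLoop cs 2 lex' ((q : Int) + 1)).1 ≠ 4 := by
        intro h' lex'
        rw [hcast]
        exact (ihn cs (q + 1) (by omega) lex').2.1 h'
      have IH3some : ∀ (lex' t' : List Char), pvRun3 (cs.drop (q + 1)) = some t' →
          analizarLoop cs 3 lex' ((q : Int) + 1) = (4, lex' ++ t') := by
        intro lex' t' h'
        rw [hcast]
        exact (ihn cs (q + 1) (by omega) lex').2.2.1 t' h'
      have IH3none : pvRun3 (cs.drop (q + 1)) = none →
          ∀ lex' : List Char, (analizarLoop cs 3 lex' ((q : Int) + 1)).1 ≠ 4 := by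
        intro h' lex'
        rw [hcast]
        exact (ihn cs (q + 1) (by omega) lex').2.2.2 h'
      refine ⟨?_, ?_, ?_, ?_⟩
      · intro t ht
        rw [hdrop, pvRun2] at ht
        rw [hstep2]
        by_cases hc : cs[q] = '*'
        · simp [hc] at ht ⊢
          obtain ⟨t', ht', rfl⟩ := ht
          rw [IH3some _ _ ht']
          simp
        · simp [hc] at ht ⊢
          obtain ⟨t', ht', rfl⟩ := ht
          rw [IH2some _ _ ht']
          simp
      · intro ht
        rw [hdrop, pvRun2] at ht
        rw [hstep2]
        by_cases hc : cs[q] = '*'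
        · simp [hc] at ht ⊢
          exact IH3none ht _
        · simp [hc] at ht ⊢
          exact IH2none ht _
      · intro t ht
        rw [hdrop, pvRun3] at ht
        rw [hstep3]
        by_cases hsl : cs[q] = '/'
        · simp [hsl] at ht ⊢
          simp [← ht]
        · by_cases hc : cs[q] = '*'
          · simp [hsl, hc] at ht ⊢
            obtain ⟨t', ht', rfl⟩ := ht
            rw [IH3some _ _ ht']
            simp
          · simp [hsl, hc] at ht ⊢
            obtain ⟨t', ht', rfl⟩ := ht
            rw [IH2some _ _ ht']
            simp
      · intro ht
        rw [hdrop, pvRun3] at ht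
        rw [hstep3]
        by_cases hsl : cs[q] = '/'
        · simp [hsl] at ht
        · by_cases hc : cs[q] = '*'
          · simp [hsl, hc] at ht ⊢
            exact IH3none ht _
          · simp [hsl, hc] at ht ⊢
            exact IH2none ht _
    · have hstop : ∀ e, analizarLoop cs e lex (q : Int) = (e, lex) :=
        fun e => pvLoop_stop cs e lex q (by exact_mod_cast Nat.le_of_not_lt hlt)
      have hdrop : cs.drop q = [] := List.drop_eq_nil_of_le (by omega)
      rw [hdrop]
      exact ⟨by simp [pvRun2], by simp [hstop], by simp [pvRun3], by simp [hstop]⟩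

theorem pvRun2_eq_fs (l : List Char) :
    pvRun2 l = (pvFS l).map (fun i => l.take (i + 2)) ∧
    pvRun3 l = (if l.head? = some '/' then some (l.take 1) else (pvFS l).map (fun i => l.take (i + 2))) := by
  induction l with
  | nil => exact ⟨by simp [pvRun2, pvFS], by simp [pvRun3, pvFS]⟩
  | cons c rest ih =>
    obtain ⟨ih2, ih3⟩ := ih
    have comp2 : pvRun2 (c :: rest) = (pvFS (c :: rest)).map (fun i => (c :: rest).take (i + 2)) := by
      rcases rest with _ | ⟨c2, rest'⟩
      · by_cases hc : c = '*' <;> simp [pvRun2, pvRun3, pvFS, hc]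
      · rw [pvRun2]
        by_cases hc : c = '*'
        · rw [ih3]
          by_cases hc2 : c2 = '/'
          · simp [pvFS, hc, hc2]
          · rcases hfs : pvFS (c2 :: rest') with _ | i <;>
              simp [pvFS, hc, hc2, hfs, List.take_succ_cons]
        · rw [ih2]
          rcases hfs : pvFS (c2 :: rest') with _ | i <;>
            simp [pvFS, hc, hfs, List.take_succ_cons]
    refine ⟨comp2, ?_⟩
    by_cases hc : c = '/'
    · rw [pvRun3]; simp [hc]
    · have : pvRun3 (c :: rest) = pvRun2 (c :: rest) := by rw [pvRun2, pvRun3]; simp [hc]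
      rw [this, comp2]; simp [hc]

theorem pvFS_some_spec (l : List Char) (i : Nat) (h : pvFS l = some i) :
    ['*', '/'] <+: l.drop i ∧ ∀ j < i, ¬ ['*', '/'] <+: l.drop j := by
  induction l generalizing i with
  | nil => simp [pvFS] at h
  | cons c rest ih =>
    rcases rest with _ | ⟨c2, rest'⟩
    · simp [pvFS] at h
    · rw [pvFS] at h
      by_cases hcc : c = '*' ∧ c2 = '/'
      · simp [hcc] at h
        subst h
        exact ⟨by simp [List.cons_prefix_cons, hcc.1, hcc.2], by omega⟩
      · simp [hcc] at h
        obtain ⟨i', hi', rfl⟩ := h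
        obtain ⟨hpre, hmin⟩ := ih i' hi'
        refine ⟨by simpa using hpre, ?_⟩
        intro j hj
        rcases j with _ | j'
        · simpa [List.cons_prefix_cons] using fun h1 h2 => hcc ⟨h1.symm, h2.symm⟩
        · simpa using hmin j' (by omega)

theorem pvFS_none_spec (l : List Char) (h : pvFS l = none) : ∀ j, ¬ ['*', '/'] <+: l.drop j := by
  induction l with
  | nil => intro j hp; have := hp.length_le; simp at this
  | cons c rest ih =>
    rcases rest with _ | ⟨c2, rest'⟩
    · intro j hp
      have := hp.length_le
      rcases j with _ | j' <;> simp at this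
    · rw [pvFS] at h
      by_cases hcc : c = '*' ∧ c2 = '/'
      · simp [hcc] at h
      · simp [hcc] at h
        intro j
        rcases j with _ | j'
        · simpa [List.cons_prefix_cons] using fun h1 h2 => hcc ⟨h1.symm, h2.symm⟩
        · simpa using ih h j' 

theorem pvFS_find_none (l : List Char) (h : pvFS l = none) : PySem.Chars.find l ['*', '/'] = -1 := by
  rw [PySem.Chars.find_eq_neg_one_iff]
  intro hinf
  obtain ⟨j, hj⟩ := (PySem.Chars.exists_prefix_drop_iff_isIn ['*', '/'] l).mpr
    ((PySem.Chars.isIn_iff_infix ['*', '/'] l).mpr hinf)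
  exact pvFS_none_spec l h j hj

theorem pvFS_find_some (l : List Char) (i : Nat) (h : pvFS l = some i) :
    PySem.Chars.find l ['*', '/'] = (i : Int) := by
  obtain ⟨hpre, hmin⟩ := pvFS_some_spec l i h
  have hinf : ['*', '/'] <:+: l := hpre.isInfix.trans (l.drop_suffix i).isInfix
  have h0 : 0 ≤ PySem.Chars.find l ['*', '/'] := (PySem.Chars.find_nonneg_iff l ['*', '/']).mpr hinf
  obtain ⟨hfp, hfmin⟩ := PySem.Chars.find_spec h0
  have hne : (PySem.Chars.find l ['*', '/']).toNat = i := by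
    rcases Nat.lt_trichotomy (PySem.Chars.find l ['*', '/']).toNat i with hlt | heq | hgt
    · exact absurd hfp (hmin _ hlt)
    · exact heq
    · exact absurd hpre (hfmin i hgt)
  omega

-- ===== VERDICT (by name: the statement is the Claim_ definition above) =====
theorem pvSlice_take2 (cs : List Char) (p : Nat) :
    PySem.List.slice cs (some (p : Int)) (some ((p : Int) + 2)) = (cs.drop p).take 2 := by
  have h : ((p : Int) + 2) = ((p + 2 : Nat) : Int) := by push_cast; ring
  rw [h, PySem.List.slice_natCast]
  congr 1
  omega

theorem analizar_spec : Claim_equal_analizar := by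
  unfold Claim_equal_analizar
  intro texto pos _ hpre
  unfold Spec_analizar analizar analizar_alt Pre_analizar at *
  lift pos to Nat using hpre with p
  obtain ⟨cs, hcs⟩ : ∃ cs, texto.toList = cs := ⟨_, rfl⟩
  rw [hcs, pvSlice_take2 cs p]
  by_cases hl : cs.length <= p
  · have hdrop : cs.drop p = [] := List.drop_eq_nil_of_le hl
    rw [pvLoop_stop cs 0 [] p (by exact_mod_cast hl)]
    simp [hdrop]
  · push_neg at hl
    obtain ⟨c0, hc0e⟩ : ∃ c, cs[p] = c := ⟨_, rfl⟩
    have hdropp : cs.drop p = c0 :: cs.drop (p + 1) := by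
      rw [← hc0e]; exact List.drop_eq_getElem_cons hl
    have hget : PySem.List.pyGet? cs (p : Int) = some c0 := by
      rw [PySem.List.pyGet?_natCast, List.getElem?_eq_getElem hl, hc0e]
    have hlen : (p : Int) < (cs.length : Int) := by exact_mod_cast hl
    have hstep0 : analizarLoop cs 0 [] (p : Int) =
        (if c0 = '/' then analizarLoop cs 1 [c0] ((p : Int) + 1) else (0, [])) := by
      rw [analizarLoop]
      rw [dif_pos hlen, hget]
      norm_num
    by_cases hc0 : c0 = '/'
    · subst hc0
      rw [hstep0, if_pos rfl]
      by_cases hl1 : cs.length <= p + 1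
      · have hdrop1 : cs.drop (p + 1) = [] := List.drop_eq_nil_of_le hl1
        have : analizarLoop cs 1 ['/'] ((p : Int) + 1) = (1, ['/']) := by
          rw [show ((p : Int) + 1) = ((p + 1 : Nat) : Int) by push_cast; ring]
          exact pvLoop_stop cs 1 ['/'] (p + 1) (by exact_mod_cast hl1)
        rw [this]
        simp [hdropp, hdrop1]
      · push_neg at hl1
        obtain ⟨c1, hc1e⟩ : ∃ c, cs[p + 1] = c := ⟨_, rfl⟩
        have hdropp1 : cs.drop (p + 1) = c1 :: cs.drop (p + 2) := by
          rw [← hc1e]; exact List.drop_eq_getElem_cons hl1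
        have hget1 : PySem.List.pyGet? cs ((p : Int) + 1) = some c1 := by
          rw [show ((p : Int) + 1) = ((p + 1 : Nat) : Int) by push_cast; ring,
            PySem.List.pyGet?_natCast, List.getElem?_eq_getElem hl1, hc1e]
        have hlen1 : (p : Int) + 1 < (cs.length : Int) := by
          rw [show ((p : Int) + 1) = ((p + 1 : Nat) : Int) by push_cast; ring]
          exact_mod_cast hl1
        have hstep1 : analizarLoop cs 1 ['/'] ((p : Int) + 1) =
            (if c1 = '*' then analizarLoop cs 2 ['/', c1] ((p : Int) + 2)
             else (1, ['/'])) := by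
          rw [analizarLoop]
          rw [dif_pos hlen1, hget1]
          norm_num
          rw [show ((p : Int) + 1 + 1) = ((p : Int) + 2) by ring]
        rw [hstep1]
        by_cases hc1 : c1 = '*'
        · subst hc1
          rw [if_pos rfl]
          have htake2 : (cs.drop p).take 2 = ['/', '*'] := by
            rw [hdropp, hdropp1]
            simp
          rw [htake2]
          have hcast2 : ((p : Int) + 2) = ((p + 2 : Nat) : Int) := by push_cast; ring
          have hple : p + 2 <= cs.length := by omega
          have hff : PySem.Chars.findFrom cs ['*', '/'] ((p : Int) + 2) none =
              (if PySem.Chars.find (cs.drop (p + 2)) ['*', '/'] = -1 then -1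
               else ((p + 2 : Nat) : Int) + PySem.Chars.find (cs.drop (p + 2)) ['*', '/']) := by
            rw [hcast2]
            exact PySem.Chars.findFrom_natCast cs ['*', '/'] (p + 2) hple
          have hrun := pvRun2_eq_fs (cs.drop (p + 2))
          rcases hfs : pvFS (cs.drop (p + 2)) with _ | i
          · have hfind : PySem.Chars.find (cs.drop (p + 2)) ['*', '/'] = -1 :=
              pvFS_find_none _ hfs
            have hrun2 : pvRun2 (cs.drop (p + 2)) = none := by rw [hrun.1, hfs]; rfl
            have hA : (analizarLoop cs 2 ['/', '*'] ((p : Int) + 2)).1 ≠ 4 := by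
              rw [hcast2]
              exact ((pvRun_loop cs.length cs (p + 2) (by omega) ['/', '*']).2.1) hrun2
            rw [hff, if_pos hfind, if_neg hA]
            simp
          · have hfind : PySem.Chars.find (cs.drop (p + 2)) ['*', '/'] = (i : Int) :=
              pvFS_find_some _ i hfs
            have hrun2 : pvRun2 (cs.drop (p + 2)) = some ((cs.drop (p + 2)).take (i + 2)) := by
              rw [hrun.1, hfs]; rfl
            have hA : analizarLoop cs 2 ['/', '*'] ((p : Int) + 2) =
                (4, '/' :: '*' :: (cs.drop (p + 2)).take (i + 2)) := by
              rw [hcast2]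
              exact ((pvRun_loop cs.length cs (p + 2) (by omega) ['/', '*']).1
                ((cs.drop (p + 2)).take (i + 2)) hrun2).trans (by simp)
            have hsl : PySem.List.slice cs (some (p : Int))
                (some (((p + 2 : Nat) : Int) + (i : Int) + 2)) =
                '/' :: '*' :: (cs.drop (p + 2)).take (i + 2) := by
              rw [show (((p + 2 : Nat) : Int) + (i : Int) + 2) = ((p + i + 4 : Nat) : Int) by push_cast; ring,
                PySem.List.slice_natCast]
              rw [show (p + i + 4) - p = (i + 2) + 1 + 1 from by omega]
              rw [hdropp, hdropp1]
              simp [List.take_succ_cons]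
            rw [hff, hfind]
            rw [if_neg (show ¬((i : Int) = -1) by omega)]
            rw [if_neg (show ¬(((p + 2 : Nat) : Int) + (i : Int) = -1) by push_cast; omega)]
            rw [hsl, hA]
            simp
        · rw [if_neg hc1]
          have : (cs.drop p).take 2 = ['/', c1] := by
            rw [hdropp, hdropp1]; simp
          simp [this, hc1]
    · rw [hstep0, if_neg hc0]
      have : (cs.drop p).take 2 = c0 :: (cs.drop (p + 1)).take 1 := by
        rw [hdropp]; simp
      simp [this]
      intro h1 h2
      exact absurd h1 hc0
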